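-- pv_equiv track=rewrite | github.com/oleg-tim/Checkio | Power Supply.py | power_supply
-- ===== SOURCE A (Python) =====
-- def power_supply(network, power_plants):
--
--     new_network = []
--     new_light = []
--     not_light = set([y for x in network for y in x])
--     for plant in power_plants:
--         light = [plant]
--         network = network
--         for power_count in range(power_plants[plant]):
--             for elem in network:
--                 if set(elem)&set(light):
--                     z = list(set(elem)-set(light))
--                     new_light += z
--                 else:
--                     new_network.append(elem)
--             light = new_light
--             network = new_network
--             new_light = []
--             new_network = []
--         raspakovka = [y for x in network for y in x]
--         not_light = not_light&set(set(raspakovka)-set(light))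
--     return list(not_light)
-- ===== SOURCE B (Python) =====
-- # Depth-limited BFS over a node->edge adjacency index built once, with a persistent
-- # "alive" edge mask replaying A's edge consumption across plants; O(E + P*touched)
-- # instead of rescanning (and re-building sets over) the whole edge list per layer.
-- def power_supply(network, power_plants):
--     n = len(network)
--     alive = [True] * n
--     adj = {}
--     for i, edge in enumerate(network):
--         for v in edge:
--             adj.setdefault(v, []).append(i)
--     not_light = set(y for x in network for y in x)
--     for plant, r in power_plants.items():
--         frontier = {plant}
--         steps = r
--         while steps > 0 and frontier:
--             steps -= 1
--             nxt = set()
--             for u in frontier: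
--                 for i in adj.get(u, ()):
--                     if alive[i]:
--                         alive[i] = False
--                         nxt |= set(network[i])
--             frontier = nxt - frontier
--         rest = set()
--         for i in range(n):
--             if alive[i]:
--                 rest |= set(network[i])
--         not_light &= rest - frontier
--     return list(not_light)
-- ===== Notes on version B (the rewrite author's own statement) =====
-- stated objective: faster
-- what changed: Instead of rescanning the whole remaining edge list once per power level and rebuilding set(elem)/set(light) for every edge, B builds a node-to-edge adjacency index once and runs a depth-limited BFS per plant over a persistent alive-edge mask (edges stay consumed across plants, as in A), then replays the same not_light set intersections.
import Mathlib
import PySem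

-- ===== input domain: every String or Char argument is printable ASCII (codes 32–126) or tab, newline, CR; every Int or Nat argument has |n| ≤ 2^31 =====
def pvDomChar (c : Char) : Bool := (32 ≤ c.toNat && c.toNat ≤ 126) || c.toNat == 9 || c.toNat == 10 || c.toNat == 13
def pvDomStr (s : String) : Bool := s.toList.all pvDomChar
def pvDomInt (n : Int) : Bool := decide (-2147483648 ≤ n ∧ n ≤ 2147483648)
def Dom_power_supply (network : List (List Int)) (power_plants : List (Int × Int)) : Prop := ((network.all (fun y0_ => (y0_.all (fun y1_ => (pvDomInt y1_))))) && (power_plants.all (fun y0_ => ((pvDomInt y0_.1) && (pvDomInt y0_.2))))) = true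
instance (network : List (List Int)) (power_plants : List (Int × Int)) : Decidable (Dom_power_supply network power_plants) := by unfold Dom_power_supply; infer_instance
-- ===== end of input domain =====

-- ===== PORT A =====
-- B replaces A's per-layer rescan of the whole edge list (rebuilding Python sets per edge)
-- by one node->edge adjacency index plus a persistent alive-edge mask; equivalence of the
-- RETURN value is proved on inputs whose plant keys are distinct (any Python dict).

-- one pass of A's inner `for elem in network` scan: accumulator = (new_network, new_light)
def psAScan (lt : List Int) (acc : List (List Int) × List Int) (elem : List Int) :
    List (List Int) × List Int :=
  if PySem.Set.inter (PySem.Set.ofList elem) (PySem.Set.ofList lt) ≠ [] then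
    (acc.1, acc.2 ++ PySem.Set.diff (PySem.Set.ofList elem) (PySem.Set.ofList lt))
  else (acc.1 ++ [elem], acc.2)

-- one iteration of A's `for power_count in range(...)` loop on state (network, light)
def psARound (st : List (List Int) × List Int) : List (List Int) × List Int :=
  st.1.foldl (psAScan st.2) ([], [])

-- body of A's `for plant in power_plants` loop on state (network, not_light)
def psAPlantStep (power_plants : List (Int × Int)) (st : List (List Int) × PySem.Set Int)
    (pl : Int × Int) : List (List Int) × PySem.Set Int :=
  let r : Nat := ((PySem.Dict.mk power_plants).getD pl.1 0).toNat   -- range(power_plants[plant])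
  let inner := (List.range r).foldl (fun s _ => psARound s) (st.1, [pl.1])
  let rasp := inner.1.flatMap (fun x => x)
  (inner.1, PySem.Set.inter st.2 (PySem.Set.diff (PySem.Set.ofList rasp) (PySem.Set.ofList inner.2)))

def power_supply (network : List (List Int)) (power_plants : List (Int × Int)) : List Int :=
  (power_plants.foldl (psAPlantStep power_plants)
    (network, PySem.Set.ofList (network.flatMap (fun x => x)))).2

-- ===== PORT B =====
-- adj: for i, edge in enumerate(network): for v in edge: adj.setdefault(v, []).append(i)
-- (indices kept as Nat: they index the same `network` list)
def psAdj (network : List (List Int)) : PySem.Dict Int (List Nat) :=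
  network.zipIdx.foldl
    (fun d p => p.1.foldl (fun d v => d.insert v (d.getD v [] ++ [p.2])) d)
    PySem.Dict.empty

-- `if alive[i]: alive[i] = False; nxt |= set(network[i])` (i is always < len(network))
def psKill (network : List (List Int)) (st : List Bool × PySem.Set Int) (i : Nat) :
    List Bool × PySem.Set Int :=
  if st.1.getD i false then (st.1.set i false, PySem.Set.update st.2 (network.getD i []))
  else st

-- `for u in frontier: for i in adj.get(u, ()): ...` (result is iteration-order independent)
def psBRound (network : List (List Int)) (adj : PySem.Dict Int (List Nat))
    (alive : List Bool) (frontier : PySem.Set Int) : List Bool × PySem.Set Int :=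
  frontier.foldl (fun st u => (adj.getD u []).foldl (psKill network) st) (alive, PySem.Set.empty)

-- `while steps > 0 and frontier: ... frontier = nxt - frontier`
def psBFS (network : List (List Int)) (adj : PySem.Dict Int (List Nat)) :
    Nat → List Bool → PySem.Set Int → List Bool × PySem.Set Int
  | 0, alive, frontier => (alive, frontier)
  | k+1, alive, frontier =>
    if frontier = [] then (alive, frontier)
    else
      let r := psBRound network adj alive frontier
      psBFS network adj k r.1 (PySem.Set.diff r.2 frontier)

-- `rest = set(); for i in range(n): if alive[i]: rest |= set(network[i])`
def psRest (network : List (List Int)) (alive : List Bool) : PySem.Set Int :=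
  (List.range network.length).foldl
    (fun r i => if alive.getD i false then PySem.Set.update r (network.getD i []) else r)
    PySem.Set.empty

-- body of B's `for plant, r in power_plants.items()` loop on state (alive, not_light)
def psBPlantStep (network : List (List Int)) (adj : PySem.Dict Int (List Nat))
    (st : List Bool × PySem.Set Int) (pl : Int × Int) : List Bool × PySem.Set Int :=
  let b := psBFS network adj pl.2.toNat st.1 (PySem.Set.ofList [pl.1])
  (b.1, PySem.Set.inter st.2 (PySem.Set.diff (psRest network b.1) b.2))

def power_supply_alt (network : List (List Int)) (power_plants : List (Int × Int)) : List Int :=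
  (power_plants.foldl (psBPlantStep network (psAdj network))
    (List.replicate network.length true, PySem.Set.ofList (network.flatMap (fun x => x)))).2

-- ===== PRECONDITION & SPEC =====
-- Pre_ excludes association lists with duplicate plant keys, which cannot arise from the
-- Python dict `power_plants` (a dict's keys are distinct by construction).
def Pre_power_supply (network : List (List Int)) (power_plants : List (Int × Int)) : Prop :=
  (power_plants.map Prod.fst).Nodup

instance (network : List (List Int)) (power_plants : List (Int × Int)) :
    Decidable (Pre_power_supply network power_plants) := by unfold Pre_power_supply; infer_instance

def pvWitness_power_supply : List (List Int) × (List (Int × Int)) :=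
  ([[0, 1], [1, 2], [2, 3]], [(0, 1), (3, 0)])

def Spec_power_supply (network : List (List Int)) (power_plants : List (Int × Int)) (out : List Int) : Prop := out = power_supply_alt network power_plants
instance (network : List (List Int)) (power_plants : List (Int × Int)) (out : List Int) : Decidable (Spec_power_supply network power_plants out) := by unfold Spec_power_supply; infer_instance

-- ===== CLAIM (what is proved, stated in full; the proofs are below) =====
def Claim_equal_power_supply : Prop := ∀ (network : List (List Int)) (power_plants : List (Int × Int)), Dom_power_supply network power_plants → Pre_power_supply network power_plants → Spec_power_supply network power_plants (power_supply network power_plants)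

-- ===== LEMMAS AND PROOFS =====

-- A's surviving edge list, reconstructed from B's alive mask
def netOf (network : List (List Int)) (alive : List Bool) : List (List Int) :=
  (List.range network.length).filterMap
    (fun i => if alive.getD i false then some (network.getD i []) else none)

-- A's `if set(elem) & set(light)` test as a Bool
def psTouch (lt elem : List Int) : Bool :=
  !(PySem.Set.inter (PySem.Set.ofList elem) (PySem.Set.ofList lt)).isEmpty


lemma psTouch_iff (lt elem : List Int) : psTouch lt elem = true ↔ ∃ x ∈ elem, x ∈ lt := by
  simp [psTouch, List.isEmpty_iff, List.eq_nil_iff_forall_not_mem, PySem.Set.mem_inter,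
    PySem.Set.mem_ofList]

lemma netOf_mem (network : List (List Int)) (alive : List Bool) (e : List Int) :
    e ∈ netOf network alive ↔
      ∃ i, i < network.length ∧ alive.getD i false = true ∧ e = network.getD i [] := by
  simp only [netOf, List.mem_filterMap, List.mem_range]
  constructor
  · rintro ⟨i, hi, hsome⟩
    by_cases h : alive.getD i false = true
    · rw [if_pos h] at hsome; exact ⟨i, hi, h, (Option.some.inj hsome).symm⟩
    · rw [if_neg h] at hsome; cases hsome
  · rintro ⟨i, hi, h, rfl⟩; exact ⟨i, hi, by rw [if_pos h]⟩

lemma psAScan_foldl (lt : List Int) (l : List (List Int)) (nw : List (List Int)) (nl : List Int) :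
    l.foldl (psAScan lt) (nw, nl) =
      (nw ++ l.filter (fun e => !psTouch lt e),
       nl ++ (l.filter (psTouch lt)).flatMap
          (fun e => PySem.Set.diff (PySem.Set.ofList e) (PySem.Set.ofList lt))) := by
  induction l generalizing nw nl with
  | nil => simp
  | cons e l ih =>
    by_cases h : PySem.Set.inter (PySem.Set.ofList e) (PySem.Set.ofList lt) = []
    · have ht : psTouch lt e = false := by simp [psTouch, h]
      simp [List.foldl_cons, psAScan, h, ht, ih]
    · have ht : psTouch lt e = true := by
        simp [psTouch, List.isEmpty_iff, h]
      simp [List.foldl_cons, psAScan, h, ht, ih]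

lemma adj_edge_mem (e : List Int) (d : PySem.Dict Int (List Nat)) (idx j : Nat) (u : Int) :
    j ∈ (e.foldl (fun d v => d.insert v (d.getD v [] ++ [idx])) d).getD u [] ↔
      j ∈ d.getD u [] ∨ (u ∈ e ∧ j = idx) := by
  induction e generalizing d with
  | nil => simp
  | cons v e ih =>
    rw [List.foldl_cons, ih, PySem.Dict.getD_insert]
    by_cases h : u = v
    · subst h; simp; tauto
    · simp [h]

lemma adj_fold_mem (l : List (List Int × Nat)) (d : PySem.Dict Int (List Nat)) (u : Int) (j : Nat) :
    j ∈ (l.foldl (fun d p => p.1.foldl (fun d v => d.insert v (d.getD v [] ++ [p.2])) d) d).getD u [] ↔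
      j ∈ d.getD u [] ∨ ∃ p ∈ l, u ∈ p.1 ∧ j = p.2 := by
  induction l generalizing d with
  | nil => simp
  | cons p l ih => rw [List.foldl_cons, ih, adj_edge_mem]; simp; tauto

lemma psAdj_mem (network : List (List Int)) (u : Int) (i : Nat) :
    i ∈ (psAdj network).getD u [] ↔ i < network.length ∧ u ∈ network.getD i [] := by
  unfold psAdj
  rw [adj_fold_mem]
  have hemp : (PySem.Dict.empty : PySem.Dict Int (List Nat)).getD u [] = [] := rfl
  rw [hemp]
  simp only [List.not_mem_nil, false_or]
  constructor
  · rintro ⟨p, hp, hu, rfl⟩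
    rw [List.mem_zipIdx_iff_getElem?] at hp
    have hlt : p.2 < network.length := by
      by_contra hge
      rw [List.getElem?_eq_none (by omega)] at hp; cases hp
    refine ⟨hlt, ?_⟩
    rw [List.getElem?_eq_getElem hlt] at hp
    rw [List.getD_eq_getElem _ _ hlt, Option.some.inj hp]; exact hu
  · rintro ⟨hlt, hu⟩
    refine ⟨(network.getD i [], i), ?_, ?_, rfl⟩
    · rw [List.mem_zipIdx_iff_getElem?, List.getElem?_eq_getElem hlt, List.getD_eq_getElem _ _ hlt]
    · exact hu

lemma set_false_getD (al : List Bool) (i j : Nat) :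
    ((al.set i false).getD j false = true) ↔ (al.getD j false = true ∧ j ≠ i) := by
  simp only [List.getD_eq_getElem?_getD, List.getElem?_set]
  by_cases h : i = j
  · subst h
    by_cases hl : i < al.length
    · simp [hl]
    · simp [hl, List.getElem?_eq_none (l := al) (show al.length ≤ i by omega)]
  · simp [h, Ne.symm h]

lemma psKill_foldl_alive (network : List (List Int)) (idxs : List Nat)
    (st : List Bool × PySem.Set Int) (j : Nat) :
    ((idxs.foldl (psKill network) st).1.getD j false = true) ↔
      (st.1.getD j false = true ∧ j ∉ idxs) := by
  induction idxs generalizing st with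
  | nil => simp
  | cons i idxs ih =>
    rw [List.foldl_cons]
    by_cases h : st.1.getD i false = true
    · rw [show psKill network st i = (st.1.set i false, PySem.Set.update st.2 (network.getD i []))
          from by unfold psKill; rw [if_pos h], ih]
      simp only [set_false_getD, List.mem_cons]
      tauto
    · rw [show psKill network st i = st from by unfold psKill; rw [if_neg h], ih]
      simp only [List.mem_cons]
      constructor
      · rintro ⟨h1, h2⟩
        exact ⟨h1, fun hc => hc.elim (fun hji => h (hji ▸ h1)) h2⟩
      · rintro ⟨h1, h2⟩
        exact ⟨h1, fun hc => h2 (Or.inr hc)⟩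

lemma psKill_foldl_mem (network : List (List Int)) (idxs : List Nat)
    (st : List Bool × PySem.Set Int) (x : Int) :
    x ∈ (idxs.foldl (psKill network) st).2 ↔
      x ∈ st.2 ∨ ∃ i ∈ idxs, st.1.getD i false = true ∧ x ∈ network.getD i [] := by
  induction idxs generalizing st with
  | nil => simp
  | cons i idxs ih =>
    rw [List.foldl_cons]
    by_cases h : st.1.getD i false = true
    · rw [show psKill network st i = (st.1.set i false, PySem.Set.update st.2 (network.getD i []))
          from by unfold psKill; rw [if_pos h], ih]
      simp only [PySem.Set.mem_update, List.mem_cons, set_false_getD]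
      constructor
      · rintro ((hx | hx) | ⟨i', hi', ⟨ha, hne⟩, hx⟩)
        exacts [Or.inl hx, Or.inr ⟨i, Or.inl rfl, h, hx⟩, Or.inr ⟨i', Or.inr hi', ha, hx⟩]
      · rintro (hx | ⟨i', hi'c, ha, hx⟩)
        · exact Or.inl (Or.inl hx)
        · rcases hi'c with rfl | hi'
          · exact Or.inl (Or.inr hx)
          · by_cases hii : i' = i
            · subst hii; exact Or.inl (Or.inr hx)
            · exact Or.inr ⟨i', hi', ⟨ha, hii⟩, hx⟩
    · rw [show psKill network st i = st from by unfold psKill; rw [if_neg h], ih]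
      simp only [List.mem_cons]
      constructor
      · rintro (hx | ⟨i', hi', ha, hx⟩)
        exacts [Or.inl hx, Or.inr ⟨i', Or.inr hi', ha, hx⟩]
      · rintro (hx | ⟨i', hi'c, ha, hx⟩)
        · exact Or.inl hx
        · rcases hi'c with rfl | hi'
          · exact absurd ha h
          · exact Or.inr ⟨i', hi', ha, hx⟩

lemma psBRound_foldl_alive (network : List (List Int)) (adj : PySem.Dict Int (List Nat))
    (us : List Int) (st : List Bool × PySem.Set Int) (j : Nat) :
    ((us.foldl (fun st u => (adj.getD u []).foldl (psKill network) st) st).1.getD j false = true) ↔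
      (st.1.getD j false = true ∧ ∀ u ∈ us, j ∉ adj.getD u []) := by
  induction us generalizing st with
  | nil => simp
  | cons u us ih =>
    rw [List.foldl_cons, ih, psKill_foldl_alive]
    simp only [List.mem_cons]
    constructor
    · rintro ⟨⟨h1, h2⟩, h3⟩
      exact ⟨h1, fun u' hu' => hu'.elim (fun he => he ▸ h2) (h3 u')⟩
    · rintro ⟨h1, h2⟩
      exact ⟨⟨h1, h2 u (Or.inl rfl)⟩, fun u' hu' => h2 u' (Or.inr hu')⟩

lemma psBRound_foldl_mem (network : List (List Int)) (adj : PySem.Dict Int (List Nat))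
    (us : List Int) (st : List Bool × PySem.Set Int) (x : Int) :
    x ∈ (us.foldl (fun st u => (adj.getD u []).foldl (psKill network) st) st).2 ↔
      x ∈ st.2 ∨ ∃ i, (∃ u ∈ us, i ∈ adj.getD u []) ∧ st.1.getD i false = true ∧
        x ∈ network.getD i [] := by
  induction us generalizing st with
  | nil => simp
  | cons u us ih =>
    rw [List.foldl_cons, ih]
    simp only [psKill_foldl_mem, psKill_foldl_alive, List.mem_cons]
    constructor
    · rintro ((hx | ⟨i, hi, ha, hx⟩) | ⟨i, ⟨u', hu', hiu'⟩, ⟨ha, hni⟩, hx⟩)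
      · exact Or.inl hx
      · exact Or.inr ⟨i, ⟨u, Or.inl rfl, hi⟩, ha, hx⟩
      · exact Or.inr ⟨i, ⟨u', Or.inr hu', hiu'⟩, ha, hx⟩
    · rintro (hx | ⟨i, ⟨u', hu'c, hiu'⟩, ha, hx⟩)
      · exact Or.inl (Or.inl hx)
      · rcases hu'c with rfl | hu'
        · exact Or.inl (Or.inr ⟨i, hiu', ha, hx⟩)
        · by_cases hadj : i ∈ adj.getD u []
          · exact Or.inl (Or.inr ⟨i, hadj, ha, hx⟩)
          · exact Or.inr ⟨i, ⟨u', hu', hiu'⟩, ⟨ha, hadj⟩, hx⟩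

lemma filterMap_if_filter (network : List (List Int)) (l : List Nat)
    (q : Nat → Bool) (p : List Int → Bool) :
    (l.filterMap (fun i => if q i then some (network.getD i []) else none)).filter p =
      l.filterMap (fun i => if q i && p (network.getD i []) then some (network.getD i []) else none) := by
  induction l with
  | nil => simp
  | cons i l ih =>
    rw [List.filterMap_cons, List.filterMap_cons]
    by_cases hq : q i = true
    · by_cases hp : p (network.getD i []) = true
      · rw [if_pos hq, if_pos (show (q i && p (network.getD i [])) = true by rw [hq, hp]; rfl),
          List.filter_cons_of_pos hp, ih]
      · rw [if_pos hq, if_neg (show ¬ (q i && p (network.getD i [])) = true by rw [hq, Bool.true_and]; exact hp),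
          List.filter_cons_of_neg hp, ih]
    · rw [if_neg hq, if_neg (show ¬ (q i && p (network.getD i [])) = true by rw [Bool.and_eq_true]; rintro ⟨h1, _⟩; exact hq h1), ih]

lemma round_equiv (network : List (List Int)) (alive : List Bool) (lt : List Int)
    (F : PySem.Set Int) (hF : ∀ x, x ∈ lt ↔ x ∈ F) :
    (psARound (netOf network alive, lt)).1 = netOf network (psBRound network (psAdj network) alive F).1 ∧
    ∀ x, x ∈ (psARound (netOf network alive, lt)).2 ↔
      x ∈ PySem.Set.diff (psBRound network (psAdj network) alive F).2 F := by
  have hA : psARound (netOf network alive, lt) =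
      ((netOf network alive).filter (fun e => !psTouch lt e),
       ((netOf network alive).filter (psTouch lt)).flatMap
          (fun e => PySem.Set.diff (PySem.Set.ofList e) (PySem.Set.ofList lt))) := by
    unfold psARound
    rw [psAScan_foldl]
    simp
  have hbr : ∀ i, (psBRound network (psAdj network) alive F).1.getD i false = true ↔
      alive.getD i false = true ∧ ∀ u ∈ F, i ∉ (psAdj network).getD u [] := by
    intro i
    unfold psBRound
    exact psBRound_foldl_alive network (psAdj network) F (alive, PySem.Set.empty) i
  have hT : ∀ i, psTouch lt (network.getD i []) = true ↔ ∃ u ∈ F, u ∈ network.getD i [] := by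
    intro i
    rw [psTouch_iff]
    constructor
    · rintro ⟨x, hx, hxl⟩; exact ⟨x, (hF x).mp hxl, hx⟩
    · rintro ⟨u, hu, hui⟩; exact ⟨u, hui, (hF u).mpr hu⟩
  constructor
  · rw [hA]
    show (netOf network alive).filter (fun e => !psTouch lt e) = _
    unfold netOf
    rw [filterMap_if_filter]
    apply List.filterMap_congr
    intro i hi
    rw [List.mem_range] at hi
    have hcond : (alive.getD i false && !psTouch lt (network.getD i [])) =
        (psBRound network (psAdj network) alive F).1.getD i false := by
      rw [Bool.eq_iff_iff, Bool.and_eq_true, hbr i]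
      constructor
      · rintro ⟨h1, h2⟩
        refine ⟨h1, fun u hu hadj => ?_⟩
        rw [psAdj_mem] at hadj
        rw [(hT i).mpr ⟨u, hu, hadj.2⟩] at h2
        simp at h2
      · rintro ⟨h1, h2⟩
        refine ⟨h1, ?_⟩
        by_cases ht : psTouch lt (network.getD i []) = true
        · rcases (hT i).mp ht with ⟨u, hu, hui⟩
          exact absurd ((psAdj_mem network u i).mpr ⟨hi, hui⟩) (h2 u hu)
        · simp only [Bool.not_eq_true'] at *
          rw [Bool.not_eq_true] at ht
          rw [ht]
      -- end hcond
    rw [hcond]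
  · intro x
    rw [hA]
    simp only [List.mem_flatMap, List.mem_filter, PySem.Set.mem_diff, PySem.Set.mem_ofList]
    have hb2 : x ∈ (psBRound network (psAdj network) alive F).2 ↔
        ∃ i, (∃ u ∈ F, i ∈ (psAdj network).getD u []) ∧ alive.getD i false = true ∧
          x ∈ network.getD i [] := by
      unfold psBRound
      rw [psBRound_foldl_mem]
      simp
    rw [hb2]
    constructor
    · rintro ⟨e, ⟨he, hte⟩, hx, hxl⟩
      rcases (netOf_mem network alive e).mp he with ⟨i, hi, ha, rfl⟩
      rcases (psTouch_iff _ _).mp hte with ⟨y, hy, hyl⟩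
      exact ⟨⟨i, ⟨y, (hF y).mp hyl, (psAdj_mem network y i).mpr ⟨hi, hy⟩⟩, ha, hx⟩,
        fun hxF => hxl ((hF x).mpr hxF)⟩
    · rintro ⟨⟨i, ⟨u, hu, hadj⟩, ha, hx⟩, hxF⟩
      rw [psAdj_mem] at hadj
      exact ⟨network.getD i [], ⟨(netOf_mem network alive _).mpr ⟨i, hadj.1, ha, rfl⟩,
        (psTouch_iff _ _).mpr ⟨u, hadj.2, (hF u).mpr hu⟩⟩, hx, fun hxl => hxF ((hF x).mp hxl)⟩

lemma psARound_nil (net : List (List Int)) : psARound (net, ([] : List Int)) = (net, []) := by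
  unfold psARound
  rw [psAScan_foldl]
  have h : ∀ e : List Int, psTouch ([] : List Int) e = false := by
    intro e
    simp [psTouch, PySem.Set.inter, PySem.Set.ofList_nil, PySem.Set.contains]
  simp [h]

lemma foldl_const_iterate {α β : Type} (g : α → α) (l : List β) (s : α) :
    l.foldl (fun s _ => g s) s = g^[l.length] s := by
  induction l generalizing s with
  | nil => rfl
  | cons b l ih => rw [List.foldl_cons, List.length_cons, Function.iterate_succ_apply, ih]

lemma bfs_equiv (network : List (List Int)) (r : Nat) (alive : List Bool) (lt : List Int)
    (F : PySem.Set Int) (hF : ∀ x, x ∈ lt ↔ x ∈ F) :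
    (psARound^[r] (netOf network alive, lt)).1 =
        netOf network (psBFS network (psAdj network) r alive F).1 ∧
    ∀ x, x ∈ (psARound^[r] (netOf network alive, lt)).2 ↔
      x ∈ (psBFS network (psAdj network) r alive F).2 := by
  induction r generalizing alive lt F with
  | zero => exact ⟨rfl, hF⟩
  | succ k ih =>
    by_cases hFe : F = []
    · have hlt : lt = [] := by
        rw [List.eq_nil_iff_forall_not_mem]
        intro a ha
        have h := (hF a).mp ha
        rw [hFe] at h
        cases h
      subst hlt
      rw [Function.iterate_fixed (psARound_nil _) (k+1)]
      rw [show psBFS network (psAdj network) (k+1) alive F = (alive, F) from by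
        unfold psBFS; rw [if_pos hFe]]
      subst hFe
      exact ⟨rfl, fun x => Iff.rfl⟩
    · rw [Function.iterate_succ_apply]
      have hr := round_equiv network alive lt F hF
      have hpair : psARound (netOf network alive, lt) =
          (netOf network (psBRound network (psAdj network) alive F).1,
           (psARound (netOf network alive, lt)).2) := by
        rw [← hr.1]
      have hstep : psBFS network (psAdj network) (k+1) alive F =
          psBFS network (psAdj network) k (psBRound network (psAdj network) alive F).1
            (PySem.Set.diff (psBRound network (psAdj network) alive F).2 F) := by
        simp only [psBFS]; rw [if_neg hFe]
      rw [hpair, hstep]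
      exact ih _ _ _ hr.2

lemma rest_fold (network : List (List Int)) (alive : List Bool) (l : List Nat)
    (r0 : PySem.Set Int) (x : Int) :
    x ∈ l.foldl (fun r i => if alive.getD i false then PySem.Set.update r (network.getD i []) else r) r0 ↔
      x ∈ r0 ∨ ∃ i ∈ l, alive.getD i false = true ∧ x ∈ network.getD i [] := by
  induction l generalizing r0 with
  | nil => simp
  | cons i l ih =>
    rw [List.foldl_cons]
    by_cases h : alive.getD i false = true
    · rw [if_pos h, ih]
      simp only [PySem.Set.mem_update, List.mem_cons]
      constructor
      · rintro ((hx | hx) | ⟨i', hi', ha, hx⟩)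
        exacts [Or.inl hx, Or.inr ⟨i, Or.inl rfl, h, hx⟩, Or.inr ⟨i', Or.inr hi', ha, hx⟩]
      · rintro (hx | ⟨i', rfl | hi', ha, hx⟩)
        exacts [Or.inl (Or.inl hx), Or.inl (Or.inr hx), Or.inr ⟨i', hi', ha, hx⟩]
    · rw [if_neg h, ih]
      simp only [List.mem_cons]
      constructor
      · rintro (hx | ⟨i', hi', ha, hx⟩)
        exacts [Or.inl hx, Or.inr ⟨i', Or.inr hi', ha, hx⟩]
      · rintro (hx | ⟨i', rfl | hi', ha, hx⟩)
        exacts [Or.inl hx, absurd ha h, Or.inr ⟨i', hi', ha, hx⟩]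

lemma psRest_mem (network : List (List Int)) (alive : List Bool) (x : Int) :
    x ∈ psRest network alive ↔
      ∃ i, i < network.length ∧ alive.getD i false = true ∧ x ∈ network.getD i [] := by
  unfold psRest
  rw [rest_fold]
  simp [List.mem_range]

lemma inter_congr (s t t' : PySem.Set Int) (h : ∀ x, x ∈ t ↔ x ∈ t') :
    PySem.Set.inter s t = PySem.Set.inter s t' := by
  simp only [PySem.Set.inter]
  apply List.filter_congr
  intro x _
  rw [Bool.eq_iff_iff, PySem.Set.contains_iff, PySem.Set.contains_iff]
  exact h x

lemma dict_lookup_of_nodup (pps : List (Int × Int)) (h : (pps.map Prod.fst).Nodup)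
    (p : Int × Int) (hp : p ∈ pps) : (PySem.Dict.mk pps).getD p.1 0 = p.2 := by
  induction pps with
  | nil => cases hp
  | cons q rest ih =>
    obtain ⟨k, v⟩ := q
    rw [List.map_cons, List.nodup_cons] at h
    rcases List.mem_cons.mp hp with rfl | hp'
    · simp [PySem.Dict.getD, PySem.Dict.get?_mk_cons]
    · have hne : ¬ (k == p.1) = true := by
        simp only [beq_iff_eq]
        intro he
        rw [he] at h
        exact h.1 (List.mem_map.mpr ⟨p, hp', rfl⟩)
      simp only [PySem.Dict.getD, PySem.Dict.get?_mk_cons, hne, if_false]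
      simpa [PySem.Dict.getD] using ih h.2 hp'

lemma netOf_replicate (network : List (List Int)) :
    netOf network (List.replicate network.length true) = network := by
  unfold netOf
  rw [List.filterMap_congr (g := fun i => some (network.getD i []))
    (by intro i hi
        rw [List.mem_range] at hi
        rw [if_pos]
        rw [List.getD_eq_getElem?_getD, List.getElem?_replicate, if_pos hi]
        rfl)]
  rw [show (fun i => some (network.getD i [])) = some ∘ (fun i => network.getD i []) from rfl,
    List.filterMap_eq_map]
  apply List.ext_getElem
  · simp
  · intro i h1 h2
    simp only [List.getElem_map, List.getElem_range]
    rw [List.getD_eq_getElem _ _ h2]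

lemma main_fold (network : List (List Int)) (power_plants : List (Int × Int))
    (l : List (Int × Int)) (alive : List Bool) (nl : PySem.Set Int)
    (hl : ∀ p ∈ l, (PySem.Dict.mk power_plants).getD p.1 0 = p.2) :
    (l.foldl (psAPlantStep power_plants) (netOf network alive, nl)).2 =
      (l.foldl (psBPlantStep network (psAdj network)) (alive, nl)).2 := by
  induction l generalizing alive nl with
  | nil => rfl
  | cons p l ih =>
    rw [List.foldl_cons, List.foldl_cons]
    have hb := bfs_equiv network p.2.toNat alive [p.1] (PySem.Set.ofList [p.1])
      (fun x => (PySem.Set.mem_ofList _ x).symm)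
    set b := psBFS network (psAdj network) p.2.toNat alive (PySem.Set.ofList [p.1]) with hbdef
    set a := psARound^[p.2.toNat] (netOf network alive, [p.1]) with hadef
    have hA : psAPlantStep power_plants (netOf network alive, nl) p =
        (a.1, PySem.Set.inter nl (PySem.Set.diff
          (PySem.Set.ofList (a.1.flatMap (fun x => x)))
          (PySem.Set.ofList a.2))) := by
      simp only [psAPlantStep]
      rw [hl p List.mem_cons_self, foldl_const_iterate, List.length_range]
    have hB : psBPlantStep network (psAdj network) (alive, nl) p =
        (b.1, PySem.Set.inter nl (PySem.Set.diff (psRest network b.1) b.2)) := rfl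
    rw [hA, hB, hb.1]
    have hnl : PySem.Set.inter nl (PySem.Set.diff
          (PySem.Set.ofList ((netOf network b.1).flatMap (fun x => x)))
          (PySem.Set.ofList a.2)) =
        PySem.Set.inter nl (PySem.Set.diff (psRest network b.1) b.2) := by
      apply inter_congr
      intro x
      rw [PySem.Set.mem_diff, PySem.Set.mem_diff, PySem.Set.mem_ofList, PySem.Set.mem_ofList,
        List.mem_flatMap, psRest_mem]
      constructor
      · rintro ⟨⟨e, he, hx⟩, hnx⟩
        rcases (netOf_mem network b.1 e).mp he with ⟨i, hi, ha, rfl⟩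
        exact ⟨⟨i, hi, ha, hx⟩, fun hc => hnx ((hb.2 x).mpr hc)⟩
      · rintro ⟨⟨i, hi, ha, hx⟩, hnx⟩
        exact ⟨⟨network.getD i [], (netOf_mem network b.1 _).mpr ⟨i, hi, ha, rfl⟩, hx⟩,
          fun hc => hnx ((hb.2 x).mp hc)⟩
    rw [hnl]
    exact ih b.1 _ (fun q hq => hl q (List.mem_cons_of_mem _ hq))

-- ===== VERDICT (by name: the statement is the Claim_ definition above) =====
theorem power_supply_spec : Claim_equal_power_supply := by
  intro network power_plants _ hpre
  unfold Spec_power_supply power_supply power_supply_alt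
  have h := main_fold network power_plants power_plants (List.replicate network.length true)
    (PySem.Set.ofList (network.flatMap (fun x => x)))
    (fun p hp => dict_lookup_of_nodup power_plants hpre p hp)
  rw [netOf_replicate] at h
  exact h
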